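-- pv_equiv track=rewrite | github.com/thuylinh-uit/Artificial-Intelligent | Tic tac toe.py | Win_Case_Human
-- ===== SOURCE A (Python) =====
-- case_win = [1, 2, 3, 4, 5, 6, 7, 8]
--
-- case_win_oxy = {(0, 0): [1, 4, 7],
--             (0, 1): [1, 5],
--             (0, 2): [1, 6, 8],
--             (1, 0): [2, 4],
--             (1, 1): [2, 5, 7, 8],
--             (1, 2): [2, 6],
--             (2, 0): [3, 4, 8],
--             (2, 1): [3, 5],
--             (2, 2): [3, 6, 7]}
--
-- def Win_Case_Human(buttons, player):
--     case_bot = []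
--     for i in range(0, 3):
--         for j in range(0, 3):
--             if buttons[i][j]["text"] == player[2]:
--                 for case in case_win_oxy[(i, j)]:
--                     if case not in case_bot:
--                         case_bot.append(case)
--     result = [i for i in case_win if not i in case_bot]
--     return len(result)
-- ===== SOURCE B (Python) =====
-- # B: iterate the 8 winning lines directly (line -> cells), counting lines in
-- # which no cell carries the player's mark; replaces A's cell -> line
-- # accumulation with dedup list.
-- LINES = [
--     [(0, 0), (0, 1), (0, 2)],
--     [(1, 0), (1, 1), (1, 2)],
--     [(2, 0), (2, 1), (2, 2)],
--     [(0, 0), (1, 0), (2, 0)],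
--     [(0, 1), (1, 1), (2, 1)],
--     [(0, 2), (1, 2), (2, 2)],
--     [(0, 0), (1, 1), (2, 2)],
--     [(0, 2), (1, 1), (2, 0)],
-- ]
--
-- def Win_Case_Human(buttons, player):
--     p = player[2]
--     return sum(1 for line in LINES
--                if all(buttons[i][j]["text"] != p for (i, j) in line))
-- ===== Notes on version B (the rewrite author's own statement) =====
-- stated objective: alternative
-- what changed: B enumerates the 8 winning lines as explicit cell-coordinate groups and counts lines with no cell marked by the player, instead of A's cell-to-line accumulation into a dedup list followed by a filter of the line ids.
import Mathlib
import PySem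

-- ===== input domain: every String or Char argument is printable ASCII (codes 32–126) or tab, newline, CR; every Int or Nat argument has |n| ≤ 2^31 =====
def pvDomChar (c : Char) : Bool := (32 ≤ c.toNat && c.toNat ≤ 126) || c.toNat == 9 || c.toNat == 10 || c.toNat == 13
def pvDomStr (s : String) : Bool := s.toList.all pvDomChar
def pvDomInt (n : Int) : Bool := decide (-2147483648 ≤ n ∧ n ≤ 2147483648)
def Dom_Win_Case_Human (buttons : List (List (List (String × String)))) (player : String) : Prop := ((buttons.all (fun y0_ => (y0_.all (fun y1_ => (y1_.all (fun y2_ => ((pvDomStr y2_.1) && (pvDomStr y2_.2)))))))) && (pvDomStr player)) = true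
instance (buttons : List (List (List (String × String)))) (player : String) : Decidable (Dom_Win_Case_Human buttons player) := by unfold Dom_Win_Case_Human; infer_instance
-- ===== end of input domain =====

-- B counts the 8 winning lines directly (line -> cells, no dedup list); alternative decomposition, same cost.


-- shared primitive accessors (the ports' `buttons[i][j]["text"]` and `player[2]`)
def pvCell (buttons : List (List (List (String × String)))) (i j : Int) : String :=
  PySem.Dict.getD (PySem.Dict.mk ((PySem.List.pyGet? ((PySem.List.pyGet? buttons i).getD []) j).getD [])) "text" ""

def pvPC (player : String) : String := match PySem.Str.pyGet? player 2 with
  | some c => String.ofList [c]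
  | none => ""

-- ===== PORT A =====
def case_win : List Int := [1, 2, 3, 4, 5, 6, 7, 8]

def case_win_oxy : PySem.Dict (Int × Int) (List Int) := PySem.Dict.mk
  [((0, 0), [1, 4, 7]), ((0, 1), [1, 5]), ((0, 2), [1, 6, 8]),
   ((1, 0), [2, 4]), ((1, 1), [2, 5, 7, 8]), ((1, 2), [2, 6]),
   ((2, 0), [3, 4, 8]), ((2, 1), [3, 5]), ((2, 2), [3, 6, 7])]

def Win_Case_Human (buttons : List (List (List (String × String)))) (player : String) : Int :=
  let case_bot : List Int :=
    (PySem.List.pyRange 0 3 1).foldl (fun cb i =>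
      (PySem.List.pyRange 0 3 1).foldl (fun cb j =>
        if pvCell buttons i j == pvPC player then
          (PySem.Dict.getD case_win_oxy (i, j) []).foldl
            (fun cb c => if cb.contains c then cb else cb ++ [c]) cb
        else cb) cb) []
  let result := case_win.filter (fun i => !(case_bot.contains i))
  (result.length : Int)

-- ===== PORT B =====
def pvLines : List (List (Int × Int)) :=
  [[(0, 0), (0, 1), (0, 2)],
   [(1, 0), (1, 1), (1, 2)],
   [(2, 0), (2, 1), (2, 2)],
   [(0, 0), (1, 0), (2, 0)],
   [(0, 1), (1, 1), (2, 1)],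
   [(0, 2), (1, 2), (2, 2)],
   [(0, 0), (1, 1), (2, 2)],
   [(0, 2), (1, 1), (2, 0)]]

def Win_Case_Human_alt (buttons : List (List (List (String × String)))) (player : String) : Int :=
  let p := pvPC player
  ((pvLines.filter (fun line => line.all (fun ij => !(pvCell buttons ij.1 ij.2 == p)))).length : Int)

-- ===== PRECONDITION & SPEC =====
-- Pre_ excludes exactly the inputs on which A raises: fewer than 3 rows / columns,
-- a cell without a "text" key, or a player string shorter than 3 characters.
def Pre_Win_Case_Human (buttons : List (List (List (String × String)))) (player : String) : Prop :=
  3 ≤ buttons.length ∧ 3 ≤ player.length ∧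
  ∀ row ∈ buttons.take 3, 3 ≤ row.length ∧
    ∀ cell ∈ row.take 3, (PySem.Dict.get? (PySem.Dict.mk cell) "text").isSome
instance (buttons : List (List (List (String × String)))) (player : String) : Decidable (Pre_Win_Case_Human buttons player) := by unfold Pre_Win_Case_Human; infer_instance

def pvWitness_Win_Case_Human : (List (List (List (String × String)))) × String :=
  ([[[("text", "X")], [("text", "")], [("text", "O")]],
    [[("text", "")], [("text", "X")], [("text", "")]],
    [[("text", "O")], [("text", "")], [("text", "X")]]], "1:X")

def Spec_Win_Case_Human (buttons : List (List (List (String × String)))) (player : String) (out : Int) : Prop := out = Win_Case_Human_alt buttons player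
instance (buttons : List (List (List (String × String)))) (player : String) (out : Int) : Decidable (Spec_Win_Case_Human buttons player out) := by unfold Spec_Win_Case_Human; infer_instance

-- ===== CLAIM (what is proved, stated in full; the proofs are below) =====
def Claim_equal_Win_Case_Human : Prop := ∀ (buttons : List (List (List (String × String)))) (player : String), Dom_Win_Case_Human buttons player → Pre_Win_Case_Human buttons player → Spec_Win_Case_Human buttons player (Win_Case_Human buttons player)

-- ===== LEMMAS AND PROOFS =====

-- ===== VERDICT (by name: the statement is the Claim_ definition above) =====
theorem Win_Case_Human_spec : Claim_equal_Win_Case_Human := by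
  intro buttons player _ _
  show Win_Case_Human buttons player = Win_Case_Human_alt buttons player
  simp only [Win_Case_Human, Win_Case_Human_alt]
  have hr : PySem.List.pyRange 0 3 1 = [0, 1, 2] := by decide
  rw [hr]
  simp only [List.foldl, pvLines, List.filter, List.all]
  generalize (pvCell buttons 0 0 == pvPC player) = b00
  generalize (pvCell buttons 0 1 == pvPC player) = b01
  generalize (pvCell buttons 0 2 == pvPC player) = b02
  generalize (pvCell buttons 1 0 == pvPC player) = b10
  generalize (pvCell buttons 1 1 == pvPC player) = b11
  generalize (pvCell buttons 1 2 == pvPC player) = b12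
  generalize (pvCell buttons 2 0 == pvPC player) = b20
  generalize (pvCell buttons 2 1 == pvPC player) = b21
  generalize (pvCell buttons 2 2 == pvPC player) = b22
  revert b00 b01 b02 b10 b11 b12 b20 b21 b22
  decide
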